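-- pv_equiv track=rewrite | github.com/ParkHyeLim/AlgorithmStudy | BinarySearch/problem2512_예산/hyerim.py | binary_categories
-- ===== SOURCE A (Python) =====
-- def binary_categories(arr, target, arr_len):
--     result = 0
--     start = min(arr)
--     end = max(arr)
--
--     while start <= end:
--         total = 0 # 배정된 예산의 합
--         mid = (start + end) // 2 # 중간점 찾기
--
--         for i in range(arr_len):
--             if arr[i] < mid:
--                 total += arr[i]
--             else:
--                 total += mid
--
--         if total <= target:
--             result = mid # 예산 최댓값 갱신
--             start = mid + 1
--         else:
--             end = mid - 1
--
--     return result
-- ===== SOURCE B (Python) =====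
-- def binary_categories(arr, target, arr_len):
--     lo = min(arr)
--     hi = max(arr)
--     k = arr_len if arr_len > 0 else 0
--     vals = sorted(arr[:k])
--     pref = [0]
--     for v in vals:
--         pref.append(pref[-1] + v)
--
--     def capped_sum(m):
--         # sum of min(x, m) over the first k items, via binary search on sorted vals
--         a, b = 0, k
--         while a < b:
--             c = (a + b) // 2
--             if vals[c] < m:
--                 a = c + 1
--             else:
--                 b = c
--         return pref[a] + m * (k - a)
--
--     if capped_sum(lo) > target:
--         return 0
--     while lo < hi:
--         mid = (lo + hi + 1) // 2
--         if capped_sum(mid) <= target: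
--             lo = mid
--         else:
--             hi = mid - 1
--     return lo
-- ===== Notes on version B (the rewrite author's own statement) =====
-- stated objective: faster
-- what changed: A rescans all arr_len items to get the capped sum at every binary-search step; B sorts the prefix once, builds prefix sums, and computes each capped sum with an inner binary search (pref[j] + mid*(k-j)), using a result-free lo<hi search with upward-rounded midpoint.
import Mathlib
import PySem

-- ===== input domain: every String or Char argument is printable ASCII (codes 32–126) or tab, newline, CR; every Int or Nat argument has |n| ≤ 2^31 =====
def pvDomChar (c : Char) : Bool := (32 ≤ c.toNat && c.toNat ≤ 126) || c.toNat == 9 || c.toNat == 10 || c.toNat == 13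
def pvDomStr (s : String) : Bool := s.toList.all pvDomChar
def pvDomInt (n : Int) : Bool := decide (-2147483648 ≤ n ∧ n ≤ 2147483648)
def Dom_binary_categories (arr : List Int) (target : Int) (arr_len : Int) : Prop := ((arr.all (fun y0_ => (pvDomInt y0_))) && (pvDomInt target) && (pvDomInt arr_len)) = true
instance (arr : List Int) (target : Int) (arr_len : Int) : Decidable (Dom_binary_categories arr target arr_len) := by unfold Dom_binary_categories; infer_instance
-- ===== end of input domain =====

-- B replaces A's O(n)-per-step capped-sum rescans with sort + prefix sums + an inner binary
-- search, and a result-free max-feasible binary search (objective: faster on large inputs).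

-- termination lemmas for the ports' while-loops (cited by name in decreasing_by)
theorem pvDecA1 {start end_ : Int} (h : start ≤ end_) :
    (end_ + 1 - (PySem.Int.floordiv (start + end_) 2 + 1)).toNat < (end_ + 1 - start).toNat := by
  have := PySem.Int.floordiv_two_mid_bounds h; omega
theorem pvDecA2 {start end_ : Int} (h : start ≤ end_) :
    (PySem.Int.floordiv (start + end_) 2 - 1 + 1 - start).toNat < (end_ + 1 - start).toNat := by
  have := PySem.Int.floordiv_two_mid_bounds h; omega
theorem pvDecF1 {a b : Int} (h : a < b) :
    (b - (PySem.Int.floordiv (a + b) 2 + 1)).toNat < (b - a).toNat := by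
  have := PySem.Int.floordiv_two_mid_bounds (le_of_lt h); omega
theorem pvDecF2 {a b : Int} (h : a < b) :
    (PySem.Int.floordiv (a + b) 2 - a).toNat < (b - a).toNat := by
  have h1 := PySem.Int.floordiv_two_mid_bounds (le_of_lt h)
  have h2 : PySem.Int.floordiv (a + b) 2 < b := by
    rw [PySem.Int.floordiv_lt_iff_lt_mul (by omega : (0:Int) < 2)]; omega
  omega
theorem pvDecL1 {lo hi : Int} (h : lo < hi) :
    (hi - PySem.Int.floordiv (lo + hi + 1) 2).toNat < (hi - lo).toNat := by
  have h1 : lo + 1 ≤ PySem.Int.floordiv (lo + hi + 1) 2 := by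
    rw [PySem.Int.le_floordiv_iff_mul_le (by omega : (0:Int) < 2)]; omega
  have h2 : PySem.Int.floordiv (lo + hi + 1) 2 ≤ hi := by
    have := PySem.Int.floordiv_lt_iff_lt_mul (a := lo + hi + 1) (q := hi + 1) (by omega : (0:Int) < 2)
    omega
  omega
theorem pvDecL2 {lo hi : Int} (h : lo < hi) :
    (PySem.Int.floordiv (lo + hi + 1) 2 - 1 - lo).toNat < (hi - lo).toNat := by
  have h1 : lo + 1 ≤ PySem.Int.floordiv (lo + hi + 1) 2 := by
    rw [PySem.Int.le_floordiv_iff_mul_le (by omega : (0:Int) < 2)]; omega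
  have h2 : PySem.Int.floordiv (lo + hi + 1) 2 ≤ hi := by
    have := PySem.Int.floordiv_lt_iff_lt_mul (a := lo + hi + 1) (q := hi + 1) (by omega : (0:Int) < 2)
    omega
  omega

-- ===== PORT A =====
-- while start <= end: binary search carrying `result`; the inner for-loop sums min(arr[i], mid).
def aLoop (arr : List Int) (target arr_len : Int) (result start end_ : Int) : Int :=
  if h : start ≤ end_ then
    let mid := PySem.Int.floordiv (start + end_) 2
    let total := (PySem.List.pyRange 0 arr_len 1).foldl
      (fun t i => if PySem.List.pyGetD arr i 0 < mid then t + PySem.List.pyGetD arr i 0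
                  else t + mid) 0
    if total ≤ target then aLoop arr target arr_len mid (mid + 1) end_
    else aLoop arr target arr_len result start (mid - 1)
  else result
termination_by (end_ + 1 - start).toNat
decreasing_by
  · exact pvDecA1 h
  · exact pvDecA2 h

def binary_categories (arr : List Int) (target : Int) (arr_len : Int) : Int :=
  let start := (PySem.List.min? arr (fun x => x)).getD 0
  let end_ := (PySem.List.max? arr (fun x => x)).getD 0
  aLoop arr target arr_len 0 start end_

-- ===== PORT B =====
-- Source B's hand-written bisect: number of elements of (sorted) vals that are < m, in [a, b).
def bFind (vals : List Int) (m a b : Int) : Int :=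
  if h : a < b then
    let c := PySem.Int.floordiv (a + b) 2
    if PySem.List.pyGetD vals c 0 < m then bFind vals m (c + 1) b
    else bFind vals m a c
  else a
termination_by (b - a).toNat
decreasing_by
  · exact pvDecF1 h
  · exact pvDecF2 h

-- capped_sum(m) = pref[a] + m * (k - a) with a = bisect position
def bCapped (vals pref : List Int) (k m : Int) : Int :=
  let a := bFind vals m 0 k
  PySem.List.pyGetD pref a 0 + m * (k - a)

-- while lo < hi: keep capped_sum(lo) <= target invariant, round midpoint up
def bLoop (vals pref : List Int) (k target lo hi : Int) : Int :=
  if h : lo < hi then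
    let mid := PySem.Int.floordiv (lo + hi + 1) 2
    if bCapped vals pref k mid ≤ target then bLoop vals pref k target mid hi
    else bLoop vals pref k target lo (mid - 1)
  else lo
termination_by (hi - lo).toNat
decreasing_by
  · exact pvDecL1 h
  · exact pvDecL2 h

def binary_categories_alt (arr : List Int) (target : Int) (arr_len : Int) : Int :=
  let lo := (PySem.List.min? arr (fun x => x)).getD 0
  let hi := (PySem.List.max? arr (fun x => x)).getD 0
  let k : Int := if arr_len > 0 then arr_len else 0
  let vals := PySem.List.sorted (PySem.List.slice arr none (some k)) (fun x => x) false
  let pref := vals.foldl (fun p v => p ++ [PySem.List.pyGetD p (-1) 0 + v]) [0]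
  if target < bCapped vals pref k lo then 0
  else bLoop vals pref k target lo hi

-- ===== PRECONDITION & SPEC =====
-- A raises on arr = [] (min()/max() of an empty list: ValueError) and on arr_len > len(arr)
-- (IndexError in the scan); Pre_ excludes exactly those raising inputs.
def Pre_binary_categories (arr : List Int) (target : Int) (arr_len : Int) : Prop :=
  arr ≠ [] ∧ arr_len ≤ (arr.length : Int)
instance (arr : List Int) (target : Int) (arr_len : Int) : Decidable (Pre_binary_categories arr target arr_len) := by unfold Pre_binary_categories; infer_instance

def pvWitness_binary_categories : List Int × Int × Int := ([110, 140, 120, 110], 485, 4)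

def Spec_binary_categories (arr : List Int) (target : Int) (arr_len : Int) (out : Int) : Prop := out = binary_categories_alt arr target arr_len
instance (arr : List Int) (target : Int) (arr_len : Int) (out : Int) : Decidable (Spec_binary_categories arr target arr_len out) := by unfold Spec_binary_categories; infer_instance

-- ===== CLAIM (what is proved, stated in full; the proofs are below) =====
def Claim_equal_binary_categories : Prop := ∀ (arr : List Int) (target : Int) (arr_len : Int), Dom_binary_categories arr target arr_len → Pre_binary_categories arr target arr_len → Spec_binary_categories arr target arr_len (binary_categories arr target arr_len)

-- ===== LEMMAS AND PROOFS =====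

-- capped sum: what both programs are computing, as a mathematical function
def fcap (vs : List Int) (m : Int) : Int := (vs.map (fun x => min x m)).sum

-- the unique characterisation of the answer: the largest m in [lo, hi] with fcap vs m ≤ target,
-- or 0 when even lo is infeasible
def AnsChar (vs : List Int) (target lo hi r : Int) : Prop :=
  if fcap vs lo ≤ target then
    lo ≤ r ∧ r ≤ hi ∧ fcap vs r ≤ target ∧ (r = hi ∨ ¬ fcap vs (r + 1) ≤ target)
  else r = 0

theorem fcap_mono (vs : List Int) {m m' : Int} (h : m ≤ m') : fcap vs m ≤ fcap vs m' := by
  unfold fcap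
  apply List.sum_le_sum
  intro x _
  exact min_le_min le_rfl h

theorem fcap_perm {vs vs' : List Int} (h : vs.Perm vs') (m : Int) : fcap vs m = fcap vs' m := by
  unfold fcap
  exact (h.map _).sum_eq

theorem ansChar_perm {vs vs' : List Int} (h : vs.Perm vs') (target lo hi r : Int) :
    AnsChar vs target lo hi r ↔ AnsChar vs' target lo hi r := by
  unfold AnsChar
  simp only [fcap_perm h]

theorem ansChar_unique (vs : List Int) (target lo hi r r' : Int)
    (h1 : AnsChar vs target lo hi r) (h2 : AnsChar vs target lo hi r') : r = r' := by
  unfold AnsChar at h1 h2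
  by_cases hf : fcap vs lo ≤ target
  · simp only [hf, if_pos] at h1 h2
    by_contra hne
    rcases lt_or_gt_of_ne hne with hlt | hlt
    · rcases h1.2.2.2 with he | hni
      · omega
      · exact hni (le_trans (fcap_mono vs (by omega : r + 1 ≤ r')) h2.2.2.1)
    · rcases h2.2.2.2 with he | hni
      · omega
      · exact hni (le_trans (fcap_mono vs (by omega : r' + 1 ≤ r)) h1.2.2.1)
  · simp only [hf, if_false] at h1 h2
    omega

-- ===== A-side =====

theorem total_eq (arr : List Int) (arr_len mid : Int) (hlen : arr_len ≤ (arr.length : Int)) :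
    (PySem.List.pyRange 0 arr_len 1).foldl
      (fun t i => if PySem.List.pyGetD arr i 0 < mid then t + PySem.List.pyGetD arr i 0
                  else t + mid) 0
    = fcap (arr.take arr_len.toNat) mid := by
  have hbody : (fun (t i : Int) => if PySem.List.pyGetD arr i 0 < mid then t + PySem.List.pyGetD arr i 0 else t + mid)
      = fun (t i : Int) => t + min (PySem.List.pyGetD arr i 0) mid := by
    funext t i
    by_cases hx : PySem.List.pyGetD arr i 0 < mid
    · simp [hx, min_eq_left (le_of_lt hx)]
    · simp [hx, min_eq_right (le_of_not_gt hx)]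
  rw [hbody, PySem.List.foldl_add]
  by_cases hneg : arr_len ≤ 0
  · rw [PySem.List.pyRange_one_eq_nil (by omega)]
    have h0 : arr_len.toNat = 0 := by omega
    simp [fcap, h0]
  · have hpos : 0 < arr_len := by omega
    have hle : arr_len.toNat ≤ arr.length := by omega
    have hlt : (List.take arr_len.toNat arr).length = arr_len.toNat := by
      simp [List.length_take]; omega
    have hmapeq : (PySem.List.pyRange 0 arr_len 1).map (fun i => min (PySem.List.pyGetD arr i 0) mid)
        = ((PySem.List.pyRange 0 arr_len 1).map (fun i => PySem.List.pyGetD (List.take arr_len.toNat arr) i 0)).map (fun x => min x mid) := by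
      rw [List.map_map]
      apply List.map_congr_left
      intro i hi
      rw [PySem.List.mem_pyRange_one] at hi
      have h1 : i < (arr.length : Int) := by omega
      have h2 : i < ((List.take arr_len.toNat arr).length : Int) := by rw [hlt]; omega
      simp only [Function.comp]
      rw [PySem.List.pyGetD_eq_getElem _ _ hi.1 h1, PySem.List.pyGetD_eq_getElem _ _ hi.1 h2,
        List.getElem_take]
    rw [hmapeq]
    set tk := List.take arr_len.toNat arr with htk
    have hlen2 : arr_len = PySem.List.len tk := by
      simp only [PySem.List.len, hlt]; omega
    rw [hlen2, PySem.List.map_pyGetD_pyRange_zero]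
    simp [fcap]

theorem aLoop_char (arr : List Int) (target arr_len lo hi : Int)
    (hlen : arr_len ≤ (arr.length : Int)) (hlohi : lo ≤ hi) :
    ∀ (n : Nat) (result start end_ : Int), n = (end_ + 1 - start).toNat →
      lo ≤ start → end_ ≤ hi → start ≤ end_ + 1 →
      ((start = lo ∧ result = 0) ∨
        (lo < start ∧ fcap (arr.take arr_len.toNat) (start - 1) ≤ target ∧ result = start - 1)) →
      (end_ < hi → ¬ fcap (arr.take arr_len.toNat) (end_ + 1) ≤ target) →
      AnsChar (arr.take arr_len.toNat) target lo hi (aLoop arr target arr_len result start end_) := by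
  intro n
  induction n using Nat.strong_induction_on with
  | _ n ih =>
    intro result start end_ hn h1 h2 h3 h4 h5
    rw [aLoop]
    by_cases hc : start ≤ end_
    · simp only [dif_pos hc]
      have hb := PySem.Int.floordiv_two_mid_bounds hc
      rw [total_eq arr arr_len _ hlen]
      by_cases ht : fcap (arr.take arr_len.toNat) (PySem.Int.floordiv (start + end_) 2) ≤ target
      · rw [if_pos ht]
        exact ih ((end_ + 1 - (PySem.Int.floordiv (start + end_) 2 + 1)).toNat) (by omega)
          _ _ _ rfl (by omega) h2 (by omega)
          (Or.inr ⟨by omega, by simpa using ht, by omega⟩) h5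
      · rw [if_neg ht]
        refine ih ((PySem.Int.floordiv (start + end_) 2 - 1 + 1 - start).toNat) (by omega)
          _ _ _ rfl h1 (by omega) (by omega) h4 ?_
        intro _
        simpa using ht
    · simp only [dif_neg hc]
      have hse : start = end_ + 1 := by omega
      unfold AnsChar
      by_cases hf : fcap (arr.take arr_len.toNat) lo ≤ target
      · rw [if_pos hf]
        rcases h4 with ⟨hsl, hr0⟩ | ⟨hsl, hps, hr⟩
        · exfalso
          have : end_ < hi := by omega
          exact h5 this (by rw [show end_ + 1 = lo by omega]; exact hf)
        · refine ⟨by omega, by omega, ?_, ?_⟩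
          · rw [hr]; exact hps
          · by_cases hh : end_ < hi
            · exact Or.inr (by rw [hr, show start - 1 + 1 = end_ + 1 by omega]; exact h5 hh)
            · exact Or.inl (by omega)
      · rw [if_neg hf]
        rcases h4 with ⟨hsl, hr0⟩ | ⟨hsl, hps, hr⟩
        · exact hr0
        · exact absurd (le_trans (fcap_mono _ (by omega : lo ≤ start - 1)) hps) hf

-- ===== B-side =====

theorem prefFold_eq (vs : List Int) :
    vs.foldl (fun p v => p ++ [PySem.List.pyGetD p (-1) 0 + v]) [0]
    = (List.range (vs.length + 1)).map (fun j => (vs.take j).sum) := by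
  induction vs using List.reverseRecOn with
  | nil => simp
  | append_singleton vs v ih =>
    rw [List.foldl_append, List.foldl_cons, List.foldl_nil, ih]
    have hlast : PySem.List.pyGetD ((List.range (vs.length + 1)).map (fun j => (vs.take j).sum)) (-1) 0
        = vs.sum := by
      rw [List.range_succ, List.map_append]
      simp [PySem.List.pyGetD_neg_one_append_singleton]
    rw [hlast]
    rw [show (vs ++ [v]).length + 1 = (vs.length + 1) + 1 by simp]
    rw [List.range_succ (n := vs.length + 1), List.map_append]
    congr 1
    · apply List.map_congr_left
      intro j hj
      rw [List.mem_range] at hj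
      rw [List.take_append_of_le_length (by omega)]
    · simp

theorem bFind_spec (vals : List Int) (m : Int) (hp : List.Pairwise (· ≤ ·) vals) :
    ∀ (n : Nat) (a b : Int), n = (b - a).toNat →
      0 ≤ a → a ≤ b → b ≤ (vals.length : Int) →
      (∀ (i : Nat) (hi : i < vals.length), (i : Int) < a → vals[i] < m) →
      (∀ (i : Nat) (hi : i < vals.length), b ≤ (i : Int) → ¬ vals[i] < m) →
      0 ≤ bFind vals m a b ∧ bFind vals m a b ≤ (vals.length : Int) ∧
      (∀ (i : Nat) (hi : i < vals.length), (i : Int) < bFind vals m a b → vals[i] < m) ∧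
      (∀ (i : Nat) (hi : i < vals.length), bFind vals m a b ≤ (i : Int) → ¬ vals[i] < m) := by
  have hpg := List.pairwise_iff_getElem.mp hp
  intro n
  induction n using Nat.strong_induction_on with
  | _ n ih =>
    intro a b hn ha hab hbl hlow hhigh
    rw [bFind]
    by_cases hc : a < b
    · simp only [dif_pos hc]
      have hb2 := PySem.Int.floordiv_two_mid_bounds (le_of_lt hc)
      have hclt : PySem.Int.floordiv (a + b) 2 < b := by
        rw [PySem.Int.floordiv_lt_iff_lt_mul (by omega : (0:Int) < 2)]; omega
      set c := PySem.Int.floordiv (a + b) 2 with hcdef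
      have hc0 : (0:Int) ≤ c := by omega
      have hcl : c < (vals.length : Int) := by omega
      rw [PySem.List.pyGetD_eq_getElem _ _ hc0 hcl]
      by_cases hx : vals[c.toNat] < m
      · rw [if_pos hx]
        refine ih ((b - (c + 1)).toNat) (by omega) (c + 1) b rfl (by omega) (by omega) hbl
          ?_ hhigh
        intro i hi hic
        rcases Nat.lt_or_ge i c.toNat with hlt' | hge'
        · exact lt_of_le_of_lt (hpg i c.toNat hi (by omega) hlt') hx
        · have hieq : i = c.toNat := by omega
          subst hieq; exact hx
      · rw [if_neg hx]
        refine ih ((c - a).toNat) (by omega) a c rfl ha (by omega) (by omega) hlow ?_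
        intro i hi hic
        rcases Nat.lt_or_ge c.toNat i with hlt' | hge'
        · intro hvm
          exact hx (lt_of_le_of_lt (hpg c.toNat i (by omega) hi hlt') hvm)
        · have hieq : i = c.toNat := by omega
          subst hieq; exact hx
    · simp only [dif_neg hc]
      exact ⟨ha, by omega, fun i hi hic => hlow i hi hic, fun i hi hic => hhigh i hi (by omega)⟩

theorem bCapped_eq (vals : List Int) (m : Int) (hp : List.Pairwise (· ≤ ·) vals) :
    bCapped vals (vals.foldl (fun p v => p ++ [PySem.List.pyGetD p (-1) 0 + v]) [0])
      ((vals.length : Int)) m = fcap vals m := by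
  simp only [bCapped]
  obtain ⟨hr0, hrl, hlow, hhigh⟩ := bFind_spec vals m hp (((vals.length : Int) - 0).toNat)
    0 (vals.length : Int) rfl le_rfl (by omega) le_rfl
    (fun i hi hic => (by omega : False).elim)
    (fun i hi hic => (by omega : False).elim)
  set r := bFind vals m 0 (vals.length : Int) with hrdef
  rw [prefFold_eq]
  rw [show r = ((r.toNat : Nat) : Int) by omega, PySem.List.pyGetD_natCast,
    PySem.List.getD_map_range _ _ _ _ (by omega)]
  have htake : ((vals.take r.toNat).map (fun x => min x m)).sum = (vals.take r.toNat).sum := by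
    have h1 : (vals.take r.toNat).map (fun x => min x m) = (vals.take r.toNat).map id := by
      apply List.map_congr_left
      intro x hx
      rw [List.mem_take_iff_getElem] at hx
      obtain ⟨i, hilt, hieq⟩ := hx
      have := hlow i (by omega) (by omega)
      rw [← hieq] at *
      exact min_eq_left (le_of_lt (by simpa using this))
    rw [h1, List.map_id]
  have hdrop : ((vals.drop r.toNat).map (fun x => min x m)).sum
      = ((vals.drop r.toNat).length : Int) * m := by
    rw [show ((vals.drop r.toNat).map (fun x => min x m)) = ((vals.drop r.toNat).map (fun _ => m)) from ?_,
      PySem.List.sum_map_const_int]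
    apply List.map_congr_left
    intro x hx
    rw [List.mem_drop_iff_getElem] at hx
    obtain ⟨i, hilt, hieq⟩ := hx
    have := hhigh (r.toNat + i) (by omega) (by omega)
    rw [← hieq] at *
    exact min_eq_right (by simpa using not_lt.mp this)
  have hsplit : fcap vals m = ((vals.take r.toNat).map (fun x => min x m)).sum
      + ((vals.drop r.toNat).map (fun x => min x m)).sum := by
    unfold fcap
    conv_lhs => rw [← List.take_append_drop r.toNat vals]
    rw [List.map_append, List.sum_append]
  rw [hsplit, htake, hdrop]
  have hdl : ((vals.drop r.toNat).length : Int) = (vals.length : Int) - (r.toNat : Int) := by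
    simp [List.length_drop]; omega
  rw [hdl]; ring

theorem bLoop_char (vals pref : List Int) (k target lo0 hi0 : Int)
    (hcap : ∀ m, bCapped vals pref k m = fcap vals m) :
    ∀ (n : Nat) (lo hi : Int), n = (hi - lo).toNat →
      lo0 ≤ lo → hi ≤ hi0 → lo ≤ hi → fcap vals lo ≤ target →
      (hi < hi0 → ¬ fcap vals (hi + 1) ≤ target) →
      AnsChar vals target lo0 hi0 (bLoop vals pref k target lo hi) := by
  intro n
  induction n using Nat.strong_induction_on with
  | _ n ih =>
    intro lo hi hn h1 h2 h3 h4 h5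
    rw [bLoop]
    by_cases hc : lo < hi
    · simp only [dif_pos hc]
      have hm1 : lo + 1 ≤ PySem.Int.floordiv (lo + hi + 1) 2 := by
        rw [PySem.Int.le_floordiv_iff_mul_le (by omega : (0:Int) < 2)]; omega
      have hm2 : PySem.Int.floordiv (lo + hi + 1) 2 ≤ hi := by
        have := PySem.Int.floordiv_lt_iff_lt_mul (a := lo + hi + 1) (q := hi + 1)
          (by omega : (0:Int) < 2)
        omega
      rw [hcap]
      by_cases ht : fcap vals (PySem.Int.floordiv (lo + hi + 1) 2) ≤ target
      · rw [if_pos ht]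
        exact ih ((hi - PySem.Int.floordiv (lo + hi + 1) 2).toNat) (by omega) _ _ rfl
          (by omega) h2 (by omega) ht h5
      · rw [if_neg ht]
        refine ih ((PySem.Int.floordiv (lo + hi + 1) 2 - 1 - lo).toNat) (by omega) _ _ rfl
          h1 (by omega) (by omega) h4 ?_
        intro _
        rw [show PySem.Int.floordiv (lo + hi + 1) 2 - 1 + 1
          = PySem.Int.floordiv (lo + hi + 1) 2 by ring]
        exact ht
    · simp only [dif_neg hc]
      have hle : lo = hi := by omega
      unfold AnsChar
      have hf0 : fcap vals lo0 ≤ target := le_trans (fcap_mono vals h1) h4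
      rw [if_pos hf0]
      refine ⟨h1, by omega, h4, ?_⟩
      by_cases hh : hi < hi0
      · exact Or.inr (by rw [hle]; exact h5 hh)
      · exact Or.inl (by omega)

-- ===== putting it together =====

theorem a_char (arr : List Int) (target arr_len : Int)
    (hne : arr ≠ []) (hlen : arr_len ≤ (arr.length : Int)) :
    AnsChar (arr.take arr_len.toNat) target
      ((PySem.List.min? arr (fun x => x)).getD 0)
      ((PySem.List.max? arr (fun x => x)).getD 0)
      (binary_categories arr target arr_len) := by
  obtain ⟨mn, hmn⟩ : ∃ m, PySem.List.min? arr (fun x => x) = some m := by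
    cases h : PySem.List.min? arr (fun x => x) with
    | none => exact absurd ((PySem.List.min?_eq_none_iff arr _).mp h) hne
    | some m => exact ⟨m, rfl⟩
  obtain ⟨mx, hmx⟩ : ∃ m, PySem.List.max? arr (fun x => x) = some m := by
    cases h : PySem.List.max? arr (fun x => x) with
    | none => exact absurd ((PySem.List.max?_eq_none_iff arr _).mp h) hne
    | some m => exact ⟨m, rfl⟩
  have hlohi : mn ≤ mx := PySem.List.min?_isMin hmn mx (PySem.List.max?_mem hmx)
  unfold binary_categories
  simp only [hmn, hmx, Option.getD_some]
  exact aLoop_char arr target arr_len mn mx hlen hlohi _ 0 mn mx rfl le_rfl le_rfl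
    (by omega) (Or.inl ⟨rfl, rfl⟩) (fun h => absurd h (lt_irrefl _))

theorem b_char (arr : List Int) (target arr_len : Int)
    (hne : arr ≠ []) (hlen : arr_len ≤ (arr.length : Int)) :
    AnsChar (arr.take arr_len.toNat) target
      ((PySem.List.min? arr (fun x => x)).getD 0)
      ((PySem.List.max? arr (fun x => x)).getD 0)
      (binary_categories_alt arr target arr_len) := by
  obtain ⟨mn, hmn⟩ : ∃ m, PySem.List.min? arr (fun x => x) = some m := by
    cases h : PySem.List.min? arr (fun x => x) with
    | none => exact absurd ((PySem.List.min?_eq_none_iff arr _).mp h) hne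
    | some m => exact ⟨m, rfl⟩
  obtain ⟨mx, hmx⟩ : ∃ m, PySem.List.max? arr (fun x => x) = some m := by
    cases h : PySem.List.max? arr (fun x => x) with
    | none => exact absurd ((PySem.List.max?_eq_none_iff arr _).mp h) hne
    | some m => exact ⟨m, rfl⟩
  have hlohi : mn ≤ mx := PySem.List.min?_isMin hmn mx (PySem.List.max?_mem hmx)
  simp only [binary_categories_alt, hmn, hmx, Option.getD_some]
  set k := if arr_len > 0 then arr_len else 0 with hk
  have hk0 : (0:Int) ≤ k := by rw [hk]; split_ifs <;> omega
  have hkt : k.toNat = arr_len.toNat := by rw [hk]; split_ifs <;> omega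
  have hslice : PySem.List.slice arr none (some k) = arr.take arr_len.toNat := by
    rw [PySem.List.slice_to _ hk0, hkt]
  set vals := PySem.List.sorted (PySem.List.slice arr none (some k)) (fun x => x) false
    with hvals
  have hperm : vals.Perm (arr.take arr_len.toNat) := by
    rw [hvals, hslice]
    exact PySem.List.sorted_perm _ _ _
  have hp : List.Pairwise (· ≤ ·) vals := by
    have := PySem.List.sorted_pairwise (PySem.List.slice arr none (some k)) (fun x => x)
    simpa [hvals] using this
  have hvl : (vals.length : Int) = k := by
    have h1 : vals.length = (arr.take arr_len.toNat).length := hperm.length_eq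
    have h2 : (arr.take arr_len.toNat).length = arr_len.toNat := by
      simp [List.length_take]; omega
    rw [hk]; split_ifs with hpos <;> omega
  have hcap : ∀ m, bCapped vals (vals.foldl (fun p v => p ++ [PySem.List.pyGetD p (-1) 0 + v]) [0]) k m
      = fcap vals m := by
    intro m
    rw [← hvl]
    exact bCapped_eq vals m hp
  rw [ansChar_perm hperm.symm]
  by_cases h0 : target < bCapped vals (vals.foldl (fun p v => p ++ [PySem.List.pyGetD p (-1) 0 + v]) [0]) k mn
  · rw [if_pos h0]
    unfold AnsChar
    rw [hcap mn] at h0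
    rw [if_neg (by omega)]
  · rw [if_neg h0]
    rw [hcap mn] at h0
    exact bLoop_char vals _ k target mn mx hcap ((mx - mn).toNat) mn mx rfl le_rfl le_rfl
      hlohi (by omega) (fun h => absurd h (lt_irrefl _))

-- ===== VERDICT (by name: the statement is the Claim_ definition above) =====
theorem binary_categories_spec : Claim_equal_binary_categories := by
  intro arr target arr_len _ hpre
  unfold Spec_binary_categories
  exact ansChar_unique _ _ _ _ _ _ (a_char arr target arr_len hpre.1 hpre.2)
    (b_char arr target arr_len hpre.1 hpre.2)
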